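-- pv_equiv track=rewrite | github.com/jadergreiner/operador-day-trade-win | scripts/agente_wdo_winfut/api_providers.py | filtrar_eventos_br_us
-- ===== SOURCE A (Python) =====
-- def filtrar_eventos_br_us(eventos: list[dict]) -> dict:
--     """Filtra eventos do calendario relevantes para BRL/USD.
--
--     Returns:
--         dict com listas 'brasil' e 'eua' de eventos de alto impacto.
--     """
--     brasil = []
--     eua = []
--     for ev in eventos:
--         country = ev.get("country", "").upper()
--         impact = ev.get("impact", "").lower()
--         title = ev.get("title", "").lower()
--
--         if country == "BRL" or "brazil" in title:
--             brasil.append(ev)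
--         elif country == "USD" or country == "US":
--             eua.append(ev)
--
--     return {
--         "brasil": brasil,
--         "eua": eua,
--         "brasil_alto_impacto": [e for e in brasil if e.get("impact", "").lower() in ("high", "holiday")],
--         "eua_alto_impacto": [e for e in eua if e.get("impact", "").lower() in ("high", "holiday")],
--     }
-- ===== SOURCE B (Python) =====
-- def filtrar_eventos_br_us(eventos: list[dict]) -> dict:
--     """Filtra eventos do calendario relevantes para BRL/USD (classifier + filters)."""
--     def categoria(ev):
--         country = ev.get("country", "").upper()
--         if country == "BRL" or "brazil" in ev.get("title", "").lower():
--             return "br"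
--         if country == "USD" or country == "US":
--             return "us"
--         return ""
--
--     def alto(ev):
--         return ev.get("impact", "").lower() in ("high", "holiday")
--
--     return {
--         "brasil": [ev for ev in eventos if categoria(ev) == "br"],
--         "eua": [ev for ev in eventos if categoria(ev) == "us"],
--         "brasil_alto_impacto": [ev for ev in eventos if categoria(ev) == "br" and alto(ev)],
--         "eua_alto_impacto": [ev for ev in eventos if categoria(ev) == "us" and alto(ev)],
--     }
-- ===== Notes on version B (the rewrite author's own statement) =====
-- stated objective: alternative
-- what changed: B replaces A's stateful loop (two list accumulators) plus two post-hoc rescans of brasil/eua with a pure per-event classifier function and four independent filters over eventos.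
import Mathlib
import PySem

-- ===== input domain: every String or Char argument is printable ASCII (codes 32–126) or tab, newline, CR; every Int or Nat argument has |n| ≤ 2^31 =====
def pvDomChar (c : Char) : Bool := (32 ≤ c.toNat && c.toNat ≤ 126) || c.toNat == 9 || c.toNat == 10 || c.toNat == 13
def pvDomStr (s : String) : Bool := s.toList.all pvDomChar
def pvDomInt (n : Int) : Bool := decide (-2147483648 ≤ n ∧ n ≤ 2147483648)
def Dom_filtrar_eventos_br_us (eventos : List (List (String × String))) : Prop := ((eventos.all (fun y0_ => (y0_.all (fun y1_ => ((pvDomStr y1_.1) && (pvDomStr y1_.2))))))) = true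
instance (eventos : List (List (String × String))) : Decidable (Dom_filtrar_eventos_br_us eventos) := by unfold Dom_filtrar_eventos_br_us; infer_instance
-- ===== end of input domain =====

-- B replaces A's stateful accumulator loop plus two rescans with a pure per-event
-- classifier and four independent filters over eventos (alternative decomposition).

-- ===== PORT A =====
-- ev.get(k, "") on a dict rendered as an association list: first match, default "".
def pvGetS (ev : List (String × String)) (k : String) : String :=
  match ev with
  | [] => ""
  | (k', v) :: rest => if k' == k then v else pvGetS rest k

-- e.get("impact", "").lower() in ("high", "holiday")
def pvAltoImpacto (e : List (String × String)) : Bool :=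
  PySem.Str.lower (pvGetS e "impact") == "high" || PySem.Str.lower (pvGetS e "impact") == "holiday"

-- the for-loop of A, accumulating (brasil, eua)
def pvLoopA (eventos : List (List (String × String)))
    (acc : List (List (String × String)) × List (List (String × String))) :
    List (List (String × String)) × List (List (String × String)) :=
  eventos.foldl (fun (acc : List (List (String × String)) × List (List (String × String))) ev =>
    let country := PySem.Str.upper (pvGetS ev "country")
    let _impact := PySem.Str.lower (pvGetS ev "impact")
    let title := PySem.Str.lower (pvGetS ev "title")
    if country == "BRL" || PySem.Str.isIn "brazil" title then (acc.1 ++ [ev], acc.2)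
    else if country == "USD" || country == "US" then (acc.1, acc.2 ++ [ev])
    else acc) acc

def filtrar_eventos_br_us (eventos : List (List (String × String))) : List (String × List (List (String × String))) :=
  let p := pvLoopA eventos ([], [])
  [("brasil", p.1), ("eua", p.2),
   ("brasil_alto_impacto", p.1.filter (fun e => pvAltoImpacto e)),
   ("eua_alto_impacto", p.2.filter (fun e => pvAltoImpacto e))]

-- ===== PORT B =====
-- B's classifier: "br", "us" or ""
def pvCategoria (ev : List (String × String)) : String :=
  let country := PySem.Str.upper (pvGetS ev "country")
  if country == "BRL" || PySem.Str.isIn "brazil" (PySem.Str.lower (pvGetS ev "title")) then "br"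
  else if country == "USD" || country == "US" then "us"
  else ""

-- B's alto(ev)
def pvAlto (ev : List (String × String)) : Bool :=
  PySem.Str.lower (pvGetS ev "impact") == "high" || PySem.Str.lower (pvGetS ev "impact") == "holiday"

def filtrar_eventos_br_us_alt (eventos : List (List (String × String))) : List (String × List (List (String × String))) :=
  [("brasil", eventos.filter (fun ev => pvCategoria ev == "br")),
   ("eua", eventos.filter (fun ev => pvCategoria ev == "us")),
   ("brasil_alto_impacto", eventos.filter (fun ev => pvCategoria ev == "br" && pvAlto ev)),
   ("eua_alto_impacto", eventos.filter (fun ev => pvCategoria ev == "us" && pvAlto ev))]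

-- ===== PRECONDITION & SPEC =====
def Spec_filtrar_eventos_br_us (eventos : List (List (String × String))) (out : List (String × List (List (String × String)))) : Prop := out = filtrar_eventos_br_us_alt eventos
instance (eventos : List (List (String × String))) (out : List (String × List (List (String × String)))) : Decidable (Spec_filtrar_eventos_br_us eventos out) := by unfold Spec_filtrar_eventos_br_us; infer_instance

-- ===== CLAIM (what is proved, stated in full; the proofs are below) =====
def Claim_equal_filtrar_eventos_br_us : Prop := ∀ (eventos : List (List (String × String))), Dom_filtrar_eventos_br_us eventos → Spec_filtrar_eventos_br_us eventos (filtrar_eventos_br_us eventos)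

-- ===== LEMMAS AND PROOFS =====

theorem pvCategoria_beq_br (ev : List (String × String)) :
    (pvCategoria ev == "br") =
      (PySem.Str.upper (pvGetS ev "country") == "BRL"
        || PySem.Str.isIn "brazil" (PySem.Str.lower (pvGetS ev "title"))) := by
  by_cases h1 : PySem.Str.upper (pvGetS ev "country") = "BRL" <;>
    by_cases h2 : PySem.Str.isIn "brazil" (PySem.Str.lower (pvGetS ev "title")) = true <;>
      by_cases h3 : PySem.Str.upper (pvGetS ev "country") = "USD" <;>
        by_cases h4 : PySem.Str.upper (pvGetS ev "country") = "US" <;>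
          simp [pvCategoria, h1, h2, h3, h4] <;> simp_all

theorem pvCategoria_beq_us (ev : List (String × String)) :
    (pvCategoria ev == "us") =
      (!(PySem.Str.upper (pvGetS ev "country") == "BRL"
          || PySem.Str.isIn "brazil" (PySem.Str.lower (pvGetS ev "title")))
        && (PySem.Str.upper (pvGetS ev "country") == "USD"
            || PySem.Str.upper (pvGetS ev "country") == "US")) := by
  by_cases h1 : PySem.Str.upper (pvGetS ev "country") = "BRL" <;>
    by_cases h2 : PySem.Str.isIn "brazil" (PySem.Str.lower (pvGetS ev "title")) = true <;>
      by_cases h3 : PySem.Str.upper (pvGetS ev "country") = "USD" <;>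
        by_cases h4 : PySem.Str.upper (pvGetS ev "country") = "US" <;>
          simp [pvCategoria, h1, h2, h3, h4] <;> simp_all

-- A's loop produces the two filters of eventos, appended after the accumulators.
theorem pvLoopA_filter (eventos : List (List (String × String)))
    (br eu : List (List (String × String))) :
    pvLoopA eventos (br, eu) =
      (br ++ eventos.filter (fun ev => pvCategoria ev == "br"),
       eu ++ eventos.filter (fun ev => pvCategoria ev == "us")) := by
  induction eventos generalizing br eu with
  | nil => simp [pvLoopA]
  | cons ev rest ih =>
    simp only [pvLoopA, List.foldl_cons] at *
    by_cases hb : (PySem.Str.upper (pvGetS ev "country") == "BRL"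
        || PySem.Str.isIn "brazil" (PySem.Str.lower (pvGetS ev "title"))) = true
    · simp only [hb, if_pos]
      rw [ih]
      simp only [List.filter_cons, pvCategoria_beq_br, pvCategoria_beq_us, hb]
      simp
    · simp only [Bool.not_eq_true] at hb
      by_cases he : (PySem.Str.upper (pvGetS ev "country") == "USD"
          || PySem.Str.upper (pvGetS ev "country") == "US") = true
      · simp only [hb, Bool.false_eq_true, if_false, he, if_pos]
        rw [ih]
        simp only [List.filter_cons, pvCategoria_beq_br, pvCategoria_beq_us, hb, he]
        simp
      · simp only [Bool.not_eq_true] at he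
        simp only [hb, he, Bool.false_eq_true, if_false]
        rw [ih]
        simp only [List.filter_cons, pvCategoria_beq_br, pvCategoria_beq_us, hb, he]
        simp

-- ===== VERDICT (by name: the statement is the Claim_ definition above) =====
theorem filtrar_eventos_br_us_spec : Claim_equal_filtrar_eventos_br_us := by
  intro eventos _
  unfold Spec_filtrar_eventos_br_us filtrar_eventos_br_us filtrar_eventos_br_us_alt
  rw [pvLoopA_filter]
  simp [List.filter_filter, pvAltoImpacto, pvAlto, Bool.and_comm]
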